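-- pv_equiv track=rewrite | github.com/dongzhang1937/file_process_system | file_process/models/document_qa.py | _extract_relevant_paragraphs
-- ===== SOURCE A (Python) =====
-- def _extract_relevant_paragraphs(content, keywords, max_length=1000):
--     """提取包含关键词的相关段落"""
--     paragraphs = content.split('\n')
--     relevant = []
--     total_length = 0
--
--     for para in paragraphs:
--         if any(kw.lower() in para.lower() for kw in keywords):
--             if total_length + len(para) <= max_length:
--                 relevant.append(para)
--                 total_length += len(para)
--             else:
--                 break
--
--     return '\n'.join(relevant) if relevant else content[:max_length]
-- ===== SOURCE B (Python) =====
-- def _extract_relevant_paragraphs(content, keywords, max_length=1000):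
--     """Different algorithm: filter matching paragraphs, build prefix sums of
--     their lengths, then BINARY-SEARCH the monotone prefix sums for the largest
--     cut whose total fits in max_length (correct because lengths are >= 0, so
--     the greedy first-overflow break equals the last prefix sum <= max_length)."""
--     kws = [kw.lower() for kw in keywords]
--     matched = [p for p in content.split('\n') if any(k in p.lower() for k in kws)]
--     sums = [0]
--     for p in matched:
--         sums.append(sums[-1] + len(p))
--     lo, hi = 0, len(matched)
--     while lo < hi:
--         mid = (lo + hi + 1) // 2
--         if sums[mid] <= max_length:
--             lo = mid
--         else:
--             hi = mid - 1
--     if lo == 0: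
--         return content[:max_length]
--     return '\n'.join(matched[:lo])
-- ===== Notes on version B (the rewrite author's own statement) =====
-- stated objective: alternative
-- what changed: Instead of one fused loop that tests, accumulates and breaks, B filters the matching paragraphs, builds the prefix sums of their lengths, and binary-searches those monotone prefix sums for the largest cut that fits in max_length (valid because lengths are nonnegative, so the greedy first-overflow break equals the last prefix sum <= max_length).
import Mathlib
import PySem

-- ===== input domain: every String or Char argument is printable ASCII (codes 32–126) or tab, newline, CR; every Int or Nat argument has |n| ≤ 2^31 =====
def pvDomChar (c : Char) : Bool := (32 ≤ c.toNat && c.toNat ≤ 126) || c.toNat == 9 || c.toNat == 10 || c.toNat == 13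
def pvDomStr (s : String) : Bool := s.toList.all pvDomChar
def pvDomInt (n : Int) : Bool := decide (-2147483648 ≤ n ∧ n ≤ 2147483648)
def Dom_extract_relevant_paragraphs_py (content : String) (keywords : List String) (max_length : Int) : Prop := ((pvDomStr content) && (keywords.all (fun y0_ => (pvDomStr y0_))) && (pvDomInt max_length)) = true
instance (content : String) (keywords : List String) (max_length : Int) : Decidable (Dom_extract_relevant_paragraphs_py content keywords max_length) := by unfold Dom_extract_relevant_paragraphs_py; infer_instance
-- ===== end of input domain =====

-- B replaces A's fused greedy loop by: filter matching paragraphs, prefix sums of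
-- their lengths, binary search for the largest fitting cut; same return value, same cost.


-- ===== PORT A =====
-- A's single fused loop: test each paragraph, accumulate it and the running
-- total while it fits, break on the first matching paragraph that overflows.
def pvALoop (keywords : List String) (max_length : Int) :
    List String → List String → Int → List String
  | [], relevant, _ => relevant
  | para :: rest, relevant, total =>
    if keywords.any (fun kw => PySem.Str.isIn (PySem.Str.lower kw) (PySem.Str.lower para)) then
      if total + PySem.Str.len para ≤ max_length then
        pvALoop keywords max_length rest (relevant ++ [para]) (total + PySem.Str.len para)
      else
        relevant   -- break
    else
      pvALoop keywords max_length rest relevant total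

def extract_relevant_paragraphs_py (content : String) (keywords : List String) (max_length : Int) : String :=
  let paragraphs := (PySem.Str.split? content "\n").getD []   -- sep "\n" ≠ "", so split? is some
  let relevant := pvALoop keywords max_length paragraphs [] 0
  if relevant.isEmpty then PySem.Str.slice content none (some max_length)
  else PySem.Str.join "\n" relevant

-- ===== PORT B =====
-- B's prefix-sum list: sums = [0]; for p in matched: sums.append(sums[-1] + len(p)).
def pvPrefixSums (acc : Int) : List String → List Int
  | [] => [acc]
  | p :: rest => acc :: pvPrefixSums (acc + PySem.Str.len p) rest

-- B's while loop: binary search for the largest lo with sums[lo] <= max_length.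
-- (mid is always a valid index of sums, so getD's default is never used.)
def pvBSearch (sums : List Int) (max_length : Int) (lo hi : Nat) : Nat :=
  if _h : lo < hi then
    let mid := (lo + hi + 1) / 2
    if sums.getD mid 0 ≤ max_length then pvBSearch sums max_length mid hi
    else pvBSearch sums max_length lo (mid - 1)
  else lo
termination_by hi - lo
decreasing_by all_goals omega

def extract_relevant_paragraphs_py_alt (content : String) (keywords : List String) (max_length : Int) : String :=
  let kws := keywords.map PySem.Str.lower
  let matched := ((PySem.Str.split? content "\n").getD []).filter
    (fun p => kws.any (fun k => PySem.Str.isIn k (PySem.Str.lower p)))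
  let sums := pvPrefixSums 0 matched
  let lo := pvBSearch sums max_length 0 matched.length
  if lo == 0 then PySem.Str.slice content none (some max_length)
  else PySem.Str.join "\n" (matched.take lo)

-- ===== PRECONDITION & SPEC =====
def Spec_extract_relevant_paragraphs_py (content : String) (keywords : List String) (max_length : Int) (out : String) : Prop := out = extract_relevant_paragraphs_py_alt content keywords max_length
instance (content : String) (keywords : List String) (max_length : Int) (out : String) : Decidable (Spec_extract_relevant_paragraphs_py content keywords max_length out) := by unfold Spec_extract_relevant_paragraphs_py; infer_instance

-- ===== CLAIM (what is proved, stated in full; the proofs are below) =====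
def Claim_equal_extract_relevant_paragraphs_py : Prop := ∀ (content : String) (keywords : List String) (max_length : Int), Dom_extract_relevant_paragraphs_py content keywords max_length → Spec_extract_relevant_paragraphs_py content keywords max_length (extract_relevant_paragraphs_py content keywords max_length)

-- ===== LEMMAS AND PROOFS =====
-- Proof-only greedy cutoff: the number of leading lengths A's loop accepts.
def pvCut (max_length : Int) : List Int → Int → Nat
  | [], _ => 0
  | l :: rest, total =>
    if total + l ≤ max_length then 1 + pvCut max_length rest (total + l) else 0

-- A's loop returns the accumulator followed by the greedy prefix of the filtered list.
theorem pvALoop_eq (keywords : List String) (max_length : Int) :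
    ∀ (paras relevant : List String) (total : Int),
      pvALoop keywords max_length paras relevant total =
        relevant ++
          (let m := paras.filter
            (fun p => keywords.any (fun kw => PySem.Str.isIn (PySem.Str.lower kw) (PySem.Str.lower p)))
           m.take (pvCut max_length (m.map PySem.Str.len) total)) := by
  intro paras
  induction paras with
  | nil => intro relevant total; simp [pvALoop, pvCut]
  | cons p rest ih =>
    intro relevant total
    by_cases hm : keywords.any (fun kw => PySem.Str.isIn (PySem.Str.lower kw) (PySem.Str.lower p)) = true
    · rw [pvALoop, if_pos hm]
      by_cases hf : total + PySem.Str.len p ≤ max_length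
      · rw [if_pos hf, ih]
        dsimp only
        rw [List.filter_cons_of_pos
          (p := fun q => keywords.any fun kw => PySem.Str.isIn (PySem.Str.lower kw) (PySem.Str.lower q)) hm]
        simp only [List.map_cons, pvCut, if_pos hf, Nat.one_add, List.take_succ_cons,
          List.append_assoc, List.singleton_append]
      · rw [if_neg hf]
        dsimp only
        rw [List.filter_cons_of_pos
          (p := fun q => keywords.any fun kw => PySem.Str.isIn (PySem.Str.lower kw) (PySem.Str.lower q)) hm]
        simp only [List.map_cons, pvCut, if_neg hf, List.take_zero, List.append_nil]
    · rw [pvALoop, if_neg hm, ih]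
      dsimp only
      rw [List.filter_cons_of_neg
        (p := fun q => keywords.any fun kw => PySem.Str.isIn (PySem.Str.lower kw) (PySem.Str.lower q)) hm]

theorem pvCut_le (max_length : Int) :
    ∀ (ls : List Int) (t : Int), pvCut max_length ls t ≤ ls.length := by
  intro ls
  induction ls with
  | nil => intro t; simp [pvCut]
  | cons l rest ih =>
    intro t
    by_cases hf : t + l ≤ max_length
    · simpa [pvCut, hf, Nat.one_add, Nat.succ_le_succ_iff] using ih (t + l)
    · simp [pvCut, hf]

-- Characterization of the greedy cut (needs nonnegative lengths).
theorem pvCut_iff (max_length : Int) :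
    ∀ (ls : List Int), (∀ l ∈ ls, 0 ≤ l) → ∀ (t : Int) (i : Nat), 1 ≤ i → i ≤ ls.length →
      (t + (ls.take i).sum ≤ max_length ↔ i ≤ pvCut max_length ls t) := by
  intro ls
  induction ls with
  | nil => intro _ t i h1 h2; simp at h2; omega
  | cons l rest ih =>
    intro hnn t i h1 h2
    have hl : 0 ≤ l := hnn l (by simp)
    have hrest : ∀ x ∈ rest, 0 ≤ x := fun x hx => hnn x (by simp [hx])
    by_cases hf : t + l ≤ max_length
    · rw [pvCut, if_pos hf]
      obtain ⟨i', rfl⟩ : ∃ i', i = i' + 1 := ⟨i - 1, by omega⟩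
      simp only [List.take_succ_cons, List.sum_cons]
      by_cases hi' : 1 ≤ i'
      · rw [show t + (l + (rest.take i').sum) = (t + l) + (rest.take i').sum by ring]
        rw [ih hrest (t + l) i' hi' (by simpa using h2)]
        omega
      · have : i' = 0 := by omega
        subst this
        simp only [List.take_zero, List.sum_nil, add_zero]
        constructor
        · intro _; omega
        · intro _; exact hf
    · rw [pvCut, if_neg hf]
      obtain ⟨i', rfl⟩ : ∃ i', i = i' + 1 := ⟨i - 1, by omega⟩
      simp only [List.take_succ_cons, List.sum_cons]
      have hs : 0 ≤ (rest.take i').sum :=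
        List.sum_nonneg (fun x hx => hrest x (List.mem_of_mem_take hx))
      constructor
      · intro h; omega
      · intro h; omega

-- The prefix-sum list indexes to the partial sums.
theorem pvPrefixSums_getD :
    ∀ (ps : List String) (a : Int) (i : Nat), i ≤ ps.length →
      (pvPrefixSums a ps).getD i 0 = a + ((ps.map PySem.Str.len).take i).sum := by
  intro ps
  induction ps with
  | nil =>
    intro a i hi
    have : i = 0 := by simpa using hi
    subst this
    simp [pvPrefixSums]
  | cons p rest ih =>
    intro a i hi
    cases i with
    | zero => simp [pvPrefixSums]
    | succ i' =>
      simp only [pvPrefixSums, List.getD_cons_succ, List.map_cons, List.take_succ_cons,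
        List.sum_cons]
      rw [ih (a + PySem.Str.len p) i' (by simpa using hi)]
      ring

-- Binary-search correctness against any cut c characterized as in pvCut_iff.
theorem pvBSearch_eq (sums : List Int) (max_length : Int) (c n : Nat)
    (_hc : c ≤ n)
    (hch : ∀ i : Nat, 1 ≤ i → i ≤ n → (sums.getD i 0 ≤ max_length ↔ i ≤ c)) :
    ∀ (k lo hi : Nat), hi - lo ≤ k → lo ≤ c → c ≤ hi → hi ≤ n →
      pvBSearch sums max_length lo hi = c := by
  intro k
  induction k with
  | zero =>
    intro lo hi hk h1 h2 h3
    rw [pvBSearch]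
    have : ¬ lo < hi := by omega
    rw [dif_neg this]
    omega
  | succ k ih =>
    intro lo hi hk h1 h2 h3
    rw [pvBSearch]
    by_cases hlt : lo < hi
    · rw [dif_pos hlt]
      have hmid1 : lo < (lo + hi + 1) / 2 := by omega
      have hmid2 : (lo + hi + 1) / 2 ≤ hi := by omega
      by_cases hs : sums.getD ((lo + hi + 1) / 2) 0 ≤ max_length
      · rw [if_pos hs]
        have : (lo + hi + 1) / 2 ≤ c := (hch _ (by omega) (by omega)).mp hs
        exact ih _ _ (by omega) this h2 h3
      · rw [if_neg hs]
        have : ¬ (lo + hi + 1) / 2 ≤ c := fun h => hs ((hch _ (by omega) (by omega)).mpr h)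
        exact ih _ _ (by omega) h1 (by omega) (by omega)
    · rw [dif_neg hlt]; omega

-- ===== VERDICT (by name: the statement is the Claim_ definition above) =====
theorem extract_relevant_paragraphs_py_spec : Claim_equal_extract_relevant_paragraphs_py := by
  intro content keywords max_length _
  unfold Spec_extract_relevant_paragraphs_py
  unfold extract_relevant_paragraphs_py extract_relevant_paragraphs_py_alt
  simp only [List.any_map, Function.comp_def]
  set paras := (PySem.Str.split? content "\n").getD [] with hparas
  set matched := paras.filter
    (fun p => keywords.any (fun kw => PySem.Str.isIn (PySem.Str.lower kw) (PySem.Str.lower p)))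
    with hmatched
  set c := pvCut max_length (matched.map PySem.Str.len) 0 with hcdef
  have hcn : c ≤ matched.length := by
    simpa using pvCut_le max_length (matched.map PySem.Str.len) 0
  have hnn : ∀ l ∈ matched.map PySem.Str.len, 0 ≤ l := by
    intro l hl
    obtain ⟨p, _, rfl⟩ := List.mem_map.mp hl
    simp [PySem.Str.len_eq]
  have hsearch : pvBSearch (pvPrefixSums 0 matched) max_length 0 matched.length = c := by
    refine pvBSearch_eq (pvPrefixSums 0 matched) max_length c matched.length hcn
      ?_ matched.length 0 matched.length (le_refl _) (Nat.zero_le c) hcn (le_refl _)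
    intro i h1 h2
    rw [pvPrefixSums_getD matched 0 i h2, zero_add]
    have := pvCut_iff max_length (matched.map PySem.Str.len) hnn 0 i h1 (by simpa using h2)
    simpa using this
  rw [pvALoop_eq]
  simp only [List.nil_append, ← hmatched, ← hcdef, hsearch]
  by_cases hc0 : c = 0
  · simp [hc0]
  · have hlen : 1 ≤ matched.length := by omega
    have hA : (matched.take c).isEmpty = false := by
      cases hm : matched with
      | nil => rw [hm] at hlen; simp at hlen
      | cons a b =>
        cases hcc : c with
        | zero => exact absurd hcc hc0
        | succ c' => simp
    have hB : (c == 0) = false := by simpa using hc0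
    simp [hA, hB]
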